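-- pv_equiv track=rewrite | github.com/emmamanucharyan/Homework | HW_BubbleSort_Book.py | return_sorted_books
-- ===== SOURCE A (Python) =====
-- def return_sorted_books(books, sorted_list):
--     sorted_books = []
--     j = 0
--     while j < len(sorted_list):
--         for book in books:
--             for value in book.values():
--                 if j == 0:
--                     if value == sorted_list[0]:
--                         sorted_books.append(book["Title"])
--                 else:
--                     if sorted_list[j] != sorted_list[j-1]:
--                         if value == sorted_list[j]:
--                             sorted_books.append(book["Title"])
--         j += 1
--     return sorted_books
-- ===== SOURCE B (Python) =====
-- def return_sorted_books(books, sorted_list):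
--     index = {}
--     for book in books:
--         for value in book.values():
--             index.setdefault(value, []).append(book)
--     result = []
--     for j in range(len(sorted_list)):
--         if j == 0 or sorted_list[j] != sorted_list[j - 1]:
--             for b in index.get(sorted_list[j], []):
--                 result.append(b["Title"])
--     return result
-- ===== Notes on version B (the rewrite author's own statement) =====
-- stated objective: faster
-- what changed: Instead of rescanning every book's values for every position of sorted_list, B builds a value-to-books index in one pass over the books and then makes a single duplicate-skipping pass over sorted_list, emitting the indexed titles.
import Mathlib
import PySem

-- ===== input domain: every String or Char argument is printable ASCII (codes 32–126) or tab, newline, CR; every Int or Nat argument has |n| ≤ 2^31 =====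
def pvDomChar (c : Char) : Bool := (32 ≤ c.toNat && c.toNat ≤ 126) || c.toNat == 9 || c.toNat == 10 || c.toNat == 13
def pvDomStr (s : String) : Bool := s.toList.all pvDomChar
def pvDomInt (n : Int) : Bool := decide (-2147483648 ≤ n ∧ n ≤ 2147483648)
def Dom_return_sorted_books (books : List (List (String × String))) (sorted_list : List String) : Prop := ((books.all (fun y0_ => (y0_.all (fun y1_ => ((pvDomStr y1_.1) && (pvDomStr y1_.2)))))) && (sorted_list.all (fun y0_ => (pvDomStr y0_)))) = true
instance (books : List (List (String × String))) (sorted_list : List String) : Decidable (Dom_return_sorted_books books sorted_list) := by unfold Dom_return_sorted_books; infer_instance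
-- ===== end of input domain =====

-- B replaces A's rescan of every book for every sorted_list position by a value→books index built
-- once, then a single deduplicating pass over sorted_list (objective: faster, asymptotic).

-- ===== PORT A =====
-- literal transliteration of A: while over j, nested for over books and book.values()
def return_sorted_books (books : List (List (String × String))) (sorted_list : List String) : List String :=
  (PySem.List.pyRange 0 (sorted_list.length : Int) 1).foldl (fun sorted_books j =>
    books.foldl (fun sorted_books book =>
      ((PySem.Dict.ofList book).values).foldl (fun sorted_books value =>
        if j == 0 then
          (if value == PySem.List.pyGetD sorted_list 0 "" then
            sorted_books ++ [(PySem.Dict.ofList book).getD "Title" ""] else sorted_books)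
        else
          (if PySem.List.pyGetD sorted_list j "" != PySem.List.pyGetD sorted_list (j - 1) "" then
            (if value == PySem.List.pyGetD sorted_list j "" then
              sorted_books ++ [(PySem.Dict.ofList book).getD "Title" ""] else sorted_books)
          else sorted_books)) sorted_books) sorted_books) []

-- ===== PORT B =====
-- literal transliteration of B: build index value→list of books, then one dedup pass over sorted_list
def return_sorted_books_alt (books : List (List (String × String))) (sorted_list : List String) : List String :=
  let index := books.foldl (fun d book =>
    ((PySem.Dict.ofList book).values).foldl (fun d value =>
      d.modify value [] (fun l => l ++ [book])) d) PySem.Dict.empty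
  (PySem.List.pyRange 0 (sorted_list.length : Int) 1).foldl (fun result j =>
    if j == 0 || PySem.List.pyGetD sorted_list j "" != PySem.List.pyGetD sorted_list (j - 1) "" then
      result ++ (index.getD (PySem.List.pyGetD sorted_list j "") []).map
        (fun b => (PySem.Dict.ofList b).getD "Title" "")
    else result) []

-- ===== PRECONDITION & SPEC =====
-- Pre_ excludes exactly the inputs on which A raises KeyError: a book one of whose values occurs in
-- sorted_list but which has no "Title" key (B raises the same KeyError there).
def Pre_return_sorted_books (books : List (List (String × String))) (sorted_list : List String) : Prop :=
  (books.all (fun book =>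
    ((PySem.Dict.ofList book).values.all (fun v => !(sorted_list.contains v))) ||
    (PySem.Dict.ofList book).contains "Title")) = true
instance (books : List (List (String × String))) (sorted_list : List String) : Decidable (Pre_return_sorted_books books sorted_list) := by unfold Pre_return_sorted_books; infer_instance
def pvWitness_return_sorted_books : (List (List (String × String))) × List String :=
  ([[("Title", "b1"), ("Author", "x")], [("Title", "b2"), ("Author", "y")]], ["x", "x", "y"])

def Spec_return_sorted_books (books : List (List (String × String))) (sorted_list : List String) (out : List String) : Prop := out = return_sorted_books_alt books sorted_list
instance (books : List (List (String × String))) (sorted_list : List String) (out : List String) : Decidable (Spec_return_sorted_books books sorted_list out) := by unfold Spec_return_sorted_books; infer_instance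

-- ===== CLAIM (what is proved, stated in full; the proofs are below) =====
def Claim_equal_return_sorted_books : Prop := ∀ (books : List (List (String × String))) (sorted_list : List String), Dom_return_sorted_books books sorted_list → Pre_return_sorted_books books sorted_list → Spec_return_sorted_books books sorted_list (return_sorted_books books sorted_list)

-- ===== LEMMAS AND PROOFS =====

-- the titles emitted for one target value t, in book order (the common canonical form)
def pvBlock (books : List (List (String × String))) (t : String) : List String :=
  books.flatMap (fun bk =>
    List.replicate (((PySem.Dict.ofList bk).values).filter (fun v => v == t)).length
      ((PySem.Dict.ofList bk).getD "Title" ""))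

lemma pv_A_inner (books : List (List (String × String))) (t : String) (acc : List String) :
    books.foldl (fun acc book =>
      ((PySem.Dict.ofList book).values).foldl (fun acc value =>
        if value == t then acc ++ [(PySem.Dict.ofList book).getD "Title" ""] else acc) acc) acc
    = acc ++ pvBlock books t := by
  induction books generalizing acc with
  | nil => simp [pvBlock]
  | cons bk bks ih =>
    rw [List.foldl_cons, PySem.List.foldl_append_if (fun v => v == t)
        (fun _ => (PySem.Dict.ofList bk).getD "Title" "") ((PySem.Dict.ofList bk).values) acc, ih]
    simp [pvBlock]

lemma pv_B_index (books : List (List (String × String))) (t : String) :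
    ((books.foldl (fun d book =>
        ((PySem.Dict.ofList book).values).foldl (fun d value =>
          d.modify value [] (fun l => l ++ [book])) d) PySem.Dict.empty).getD t []).map
      (fun b => (PySem.Dict.ofList b).getD "Title" "")
    = pvBlock books t := by
  have h : books.foldl (fun d book =>
        ((PySem.Dict.ofList book).values).foldl (fun d value =>
          d.modify value [] (fun l => l ++ [book])) d) PySem.Dict.empty
      = (books.flatMap (fun bk => ((PySem.Dict.ofList bk).values).map (fun v => (v, bk)))).foldl
          (fun d p => d.modify p.1 [] (fun l => l ++ [p.2])) PySem.Dict.empty := by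
    rw [List.foldl_flatMap]
    simp only [List.foldl_map]
  rw [h, PySem.Dict.getD_foldl_modify_append]
  simp [pvBlock, List.map_flatMap, List.filter_map, Function.comp_def, List.filter_flatMap]

theorem return_sorted_books_spec : Claim_equal_return_sorted_books := by
  intro books sorted_list _ _
  unfold Spec_return_sorted_books return_sorted_books return_sorted_books_alt
  rw [PySem.List.pyRange_zero_natCast, List.foldl_map, List.foldl_map]
  apply PySem.List.foldl_congr_mem
  intro acc k _
  by_cases hk : k = 0
  · subst hk
    simp only [Nat.cast_zero, beq_self_eq_true, if_pos, Bool.true_or]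
    rw [pv_A_inner, pv_B_index]
  · have h0 : ((k : Int) == 0) = false := by
      simp [hk]
    simp only [h0, Bool.false_or, Bool.false_eq_true, if_false]
    by_cases hne : (PySem.List.pyGetD sorted_list (k : Int) "" != PySem.List.pyGetD sorted_list ((k : Int) - 1) "") = true
    · simp only [hne, if_true]
      rw [pv_A_inner, pv_B_index]
    · have hne' : (PySem.List.pyGetD sorted_list (k : Int) "" != PySem.List.pyGetD sorted_list ((k : Int) - 1) "") = false := by
        simpa using hne
      simp only [hne', Bool.false_eq_true, if_false, List.foldl_fixed]
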